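-- pv_equiv track=rewrite | github.com/coregee/adventofcode | 2024-python/04.py | getDiagonals
-- ===== SOURCE A (Python) =====
-- def getDiagonals(array, trim=False):
--     rows = len(array)
--     cols = len(array[0])
--     diagonals = []
--     start = 1 if trim else 0
--     for a in range(start, cols):
--         diagonal = [array[b][a + b] for b in range(min(rows, cols - a))]
--         diagonals.append(diagonal)
--     return diagonals
-- ===== SOURCE B (Python) =====
-- def getDiagonals(array, trim=False):
--     rows = len(array)
--     cols = len(array[0])
--     start = 1 if trim else 0
--     buckets = [[] for _ in range(cols)]
--     for i in range(min(rows, cols - start)):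
--         row = array[i]
--         for j in range(i + start, cols):
--             buckets[j - i].append(row[j])
--     return buckets[start:]
-- ===== Notes on version B (the rewrite author's own statement) =====
-- stated objective: alternative
-- what changed: Replaces the per-diagonal comprehension (one slanted scan per diagonal) by a single row-major sweep that drops each element into a bucket keyed by its diagonal index j-i, then returns the buckets from `start` on.
import Mathlib
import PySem

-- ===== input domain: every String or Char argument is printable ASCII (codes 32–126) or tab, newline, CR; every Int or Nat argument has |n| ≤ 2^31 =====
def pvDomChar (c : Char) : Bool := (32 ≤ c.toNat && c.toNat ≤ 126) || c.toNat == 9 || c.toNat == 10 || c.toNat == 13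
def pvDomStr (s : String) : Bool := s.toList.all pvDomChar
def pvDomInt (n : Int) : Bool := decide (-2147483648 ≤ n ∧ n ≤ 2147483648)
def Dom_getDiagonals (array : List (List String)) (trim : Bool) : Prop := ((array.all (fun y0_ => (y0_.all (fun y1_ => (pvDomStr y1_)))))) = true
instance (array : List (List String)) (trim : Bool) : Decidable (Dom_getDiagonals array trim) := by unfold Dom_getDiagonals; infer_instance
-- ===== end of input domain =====

-- B replaces A's per-diagonal slanted scans by one row-major sweep into buckets keyed by j - i (objective: alternative, same cost); equality is proved on the inputs where Python A returns.

-- ===== PORT A =====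
-- one diagonal per a ∈ [start, cols): array[b][a+b] for b < min(rows, cols-a)
def getDiagonals (array : List (List String)) (trim : Bool) : List (List String) :=
  let rows := array.length
  let cols := (array.headD []).length
  let start := if trim then 1 else 0
  (List.range' start (cols - start)).map (fun a =>
    (List.range (min rows (cols - a))).map (fun b =>
      ((array[b]?.getD [])[(a + b)]?.getD "")))

-- ===== PORT B =====
-- row-major sweep: element (i, j) of the accessed rows goes to bucket j - i; return buckets[start:]
def getDiagonals_alt (array : List (List String)) (trim : Bool) : List (List String) :=
  let rows := array.length
  let cols := (array.headD []).length
  let start := if trim then 1 else 0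
  let buckets := (List.range (min rows (cols - start))).foldl
    (fun bs i =>
      let row := array[i]?.getD []
      (List.range' (i + start) (cols - (i + start))).foldl
        (fun bs j => bs.set (j - i) ((bs[(j - i)]?.getD []) ++ [row[j]?.getD ""])) bs)
    (List.replicate cols [])
  buckets.drop start

-- ===== PRECONDITION & SPEC =====
-- Pre_ excludes exactly the inputs on which Python A raises (IndexError): the empty array
-- (len(array[0])), and arrays where some accessed row i < min(rows, cols-start) is shorter
-- than cols = len(array[0]).
def Pre_getDiagonals (array : List (List String)) (trim : Bool) : Prop :=
  array ≠ [] ∧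
  ∀ i, i < min array.length ((array.headD []).length - (if trim then 1 else 0)) →
    (array.headD []).length ≤ (array[i]?.getD []).length

instance (array : List (List String)) (trim : Bool) : Decidable (Pre_getDiagonals array trim) := by
  unfold Pre_getDiagonals; infer_instance

def pvWitness_getDiagonals : List (List String) × Bool := ([["a", "b"], ["c", "d"]], false)

def Spec_getDiagonals (array : List (List String)) (trim : Bool) (out : List (List String)) : Prop := out = getDiagonals_alt array trim
instance (array : List (List String)) (trim : Bool) (out : List (List String)) : Decidable (Spec_getDiagonals array trim out) := by unfold Spec_getDiagonals; infer_instance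

-- ===== CLAIM (what is proved, stated in full; the proofs are below) =====
def Claim_equal_getDiagonals : Prop := ∀ (array : List (List String)) (trim : Bool), Dom_getDiagonals array trim → Pre_getDiagonals array trim → Spec_getDiagonals array trim (getDiagonals array trim)

-- ===== LEMMAS AND PROOFS =====

-- the inner fold preserves the number of buckets
lemma innerFold_length (g : Nat → String) (i : Nat) :
    ∀ (l : List Nat) (bs : List (List String)),
      ((l.foldl (fun bs j => bs.set (j - i) ((bs[(j - i)]?.getD []) ++ [g j])) bs).length) = bs.length := by
  intro l
  induction l with
  | nil => intro bs; rfl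
  | cons j l ih => intro bs; rw [List.foldl_cons, ih, List.length_set]

-- what the inner fold over range' j₀ n does to bucket d
lemma innerFold_getD (g : Nat → String) (i : Nat) :
    ∀ (n j₀ : Nat) (bs : List (List String)) (d : Nat), i ≤ j₀ →
      (((List.range' j₀ n).foldl (fun bs j => bs.set (j - i) ((bs[(j - i)]?.getD []) ++ [g j])) bs)[d]?.getD []) =
      if j₀ ≤ d + i ∧ d + i < j₀ + n ∧ d < bs.length then (bs[d]?.getD []) ++ [g (d + i)] else bs[d]?.getD [] := by
  intro n
  induction n with
  | zero =>
    intro j₀ bs d _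
    simp only [List.range'_zero, List.foldl_nil]
    rw [if_neg]; omega
  | succ n ih =>
    intro j₀ bs d hij
    rw [List.range'_succ, List.foldl_cons, ih _ _ _ (by omega)]
    have hlen : (bs.set (j₀ - i) ((bs[(j₀ - i)]?.getD []) ++ [g j₀])).length = bs.length := by simp
    rw [hlen]
    by_cases hd : d = j₀ - i
    · subst hd
      have hji : j₀ - i + i = j₀ := by omega
      by_cases hin : j₀ - i < bs.length
      · rw [List.getElem?_set_self (by omega)]
        simp only [Option.getD_some, hji]
        by_cases h2 : j₀ + 1 ≤ j₀ ∧ j₀ < j₀ + 1 + n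
        · rw [if_pos ⟨by omega, by omega, hin⟩, if_pos ⟨by omega, by omega, hin⟩]; omega
        · rw [if_neg (by omega), if_pos ⟨by omega, by omega, hin⟩]
      · rw [List.set_eq_of_length_le (by omega), if_neg (by omega), if_neg (by omega)]
    · rw [List.getElem?_set_ne (by omega)]
      by_cases h2 : j₀ + 1 ≤ d + i ∧ d + i < j₀ + 1 + n ∧ d < bs.length
      · rw [if_pos h2, if_pos ⟨by omega, by omega, h2.2.2⟩]
      · rw [if_neg h2, if_neg (by omega)]

-- the outer fold preserves the number of buckets
lemma outerFold_length (array : List (List String)) (start cols : Nat) :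
    ∀ (l : List Nat) (bs : List (List String)),
      ((l.foldl
        (fun bs i =>
          (List.range' (i + start) (cols - (i + start))).foldl
            (fun bs j => bs.set (j - i) ((bs[(j - i)]?.getD []) ++ [(array[i]?.getD [])[j]?.getD ""])) bs)
        bs).length) = bs.length := by
  intro l
  induction l with
  | nil => intro bs; rfl
  | cons i l ihl =>
    intro bs
    rw [List.foldl_cons, ihl, innerFold_length]

-- after processing rows 0..k-1, bucket d holds the first min k (cols - d) elements of
-- diagonal d (for start ≤ d < cols), and is [] otherwise
lemma outerFold_getD (array : List (List String)) (start cols : Nat) :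
    ∀ (k d : Nat),
      (((List.range k).foldl
        (fun bs i =>
          (List.range' (i + start) (cols - (i + start))).foldl
            (fun bs j => bs.set (j - i) ((bs[(j - i)]?.getD []) ++ [(array[i]?.getD [])[j]?.getD ""])) bs)
        (List.replicate cols []))[d]?.getD []) =
      if start ≤ d ∧ d < cols then
        (List.range (min k (cols - d))).map (fun i => (array[i]?.getD [])[(d + i)]?.getD "")
      else [] := by
  intro k
  induction k with
  | zero =>
    intro d
    simp only [List.range_zero, List.foldl_nil, List.getElem?_replicate]
    split_ifs with h1 h2 h3 <;> simp_all
  | succ k ih =>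
    intro d
    rw [List.range_succ, List.foldl_append, List.foldl_cons, List.foldl_nil,
      innerFold_getD _ _ _ _ _ _ (by omega)]
    have hlen : ((List.range k).foldl
        (fun bs i =>
          (List.range' (i + start) (cols - (i + start))).foldl
            (fun bs j => bs.set (j - i) ((bs[(j - i)]?.getD []) ++ [(array[i]?.getD [])[j]?.getD ""])) bs)
        (List.replicate cols ([] : List String))).length = cols := by
      rw [outerFold_length, List.length_replicate]
    rw [hlen, ih]
    by_cases hmain : start ≤ d ∧ d < cols
    · rw [if_pos hmain, if_pos hmain]
      obtain ⟨hs, hc⟩ := hmain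
      by_cases hk : d + k < cols
      · rw [if_pos ⟨by omega, by omega, by omega⟩]
        have h1 : min k (cols - d) = k := by omega
        have h2 : min (k + 1) (cols - d) = k + 1 := by omega
        rw [h1, h2, List.range_succ, List.map_append, List.map_cons, List.map_nil]
      · rw [if_neg (by omega)]
        have h1 : min k (cols - d) = cols - d := by omega
        have h2 : min (k + 1) (cols - d) = cols - d := by omega
        rw [h1, h2]
    · rw [if_neg hmain, if_neg hmain, if_neg (by omega)]

-- ===== VERDICT (by name: the statement is the Claim_ definition above) =====
theorem getDiagonals_spec : Claim_equal_getDiagonals := by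
  intro array trim _ _
  unfold Spec_getDiagonals getDiagonals getDiagonals_alt
  set rows := array.length with hrows
  set cols := (array.headD []).length with hcols
  set start := (if trim then 1 else 0 : Nat) with hstart
  have hblen : ((List.range (min rows (cols - start))).foldl
      (fun bs i =>
        (List.range' (i + start) (cols - (i + start))).foldl
          (fun bs j => bs.set (j - i) ((bs[(j - i)]?.getD []) ++ [(array[i]?.getD [])[j]?.getD ""])) bs)
      (List.replicate cols [])).length = cols := by
    rw [outerFold_length, List.length_replicate]
  apply List.ext_getElem
  · simp [hblen]
  · intro t h1 h2
    have ht : t < cols - start := by simpa using h1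
    rw [List.getElem_map, List.getElem_drop]
    rw [← List.getD_eq_getElem _ [] (by rw [hblen]; omega), List.getD_eq_getElem?_getD,
      outerFold_getD array start cols]
    simp only [List.getElem_range', one_mul]
    rw [if_pos ⟨by omega, by omega⟩]
    have hm : min (min rows (cols - start)) (cols - (start + t)) = min rows (cols - (start + t)) := by
      omega
    rw [hm]
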